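-- pv_equiv track=rewrite | github.com/BlazejNowicki/ASD | dp_greedy/stare/egzamin_popr_2_szablony/zad1.py | best_root
-- ===== SOURCE A (Python) =====
-- def DFS(G, u):
--     n = len(G)
--     visited = [-1]*n
--     parent = [None]*n
--     DFS_visit(G, u, visited, parent, 0)
--     return visited, parent
--
-- def DFS_visit(G, u, visited, parent, dist):
--     visited[u] = dist
--     for i in G[u]:
--         if visited[i] == -1:
--             DFS_visit(G, i, visited, parent, dist+1)
--             parent[i] = u
--
-- def max_index(T):
--     index = 0
--     for i in range(1, len(T)):
--         if T[index] < T[i]: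
--             index = i
--     return index
--
-- def best_root(L):
--     n = len(L)
--     visited, _ = DFS(L, 0)
--     path_beg = max_index(visited)
--     visited, parent = DFS(L, path_beg)
--     ptr = max_index(visited)
--     l = visited[ptr]
--     for _ in range(l//2):
--         ptr = parent[ptr]
--     return ptr
-- ===== SOURCE B (Python) =====
-- def best_root(L):
--     n = len(L)
--
--     def dist_parent(src):
--         visited = [-1] * n
--         parent = [None] * n
--         stack = [(src, 0, None)]
--         while stack:
--             u, d, p = stack.pop()
--             if visited[u] == -1:
--                 visited[u] = d
--                 parent[u] = p
--                 for i in reversed(L[u]):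
--                     stack.append((i, d + 1, u))
--         return visited, parent
--
--     visited, _ = dist_parent(0)
--     start = visited.index(max(visited))
--     visited, parent = dist_parent(start)
--     ptr = visited.index(max(visited))
--     l = visited[ptr]
--     for _ in range(l // 2):
--         ptr = parent[ptr]
--     return ptr
-- ===== Notes on version B (the rewrite author's own statement) =====
-- stated objective: idiomatic
-- what changed: The recursive DFS_visit is replaced by an iterative explicit-stack traversal (pop a node, mark distance and parent, push its neighbours), and the max_index scan is replaced by visited.index(max(visited)).
import Mathlib
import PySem

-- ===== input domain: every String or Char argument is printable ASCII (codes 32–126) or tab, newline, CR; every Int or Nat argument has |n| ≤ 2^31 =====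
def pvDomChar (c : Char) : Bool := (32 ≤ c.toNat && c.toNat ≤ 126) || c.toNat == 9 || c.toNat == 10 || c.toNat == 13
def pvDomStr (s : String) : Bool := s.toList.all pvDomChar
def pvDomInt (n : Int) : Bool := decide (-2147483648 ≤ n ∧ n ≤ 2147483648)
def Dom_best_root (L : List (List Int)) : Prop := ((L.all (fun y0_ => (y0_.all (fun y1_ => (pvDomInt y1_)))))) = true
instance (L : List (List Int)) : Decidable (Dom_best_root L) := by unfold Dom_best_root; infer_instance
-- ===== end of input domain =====

-- ===== PORT A =====

-- literal port of DFS / DFS_visit; the fuel argument only makes the recursion total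
-- (n+1 calls never exhaust it: every recursive call marks a fresh cell first)
def dfsRun (G : List (List Int)) :
    Nat → List Int × List (Option Int) → Int → Nat → List Int × List (Option Int)
  | 0, st, _, _ => st
  | fuel + 1, st, u, d =>
    if PySem.List.pyGetD st.1 u 0 = -1 then
      (PySem.List.pyGetD G u []).foldl
        (fun st' i =>
          if PySem.List.pyGetD st'.1 i 0 = -1 then
            ((dfsRun G fuel st' i (d + 1)).1,
              PySem.List.pySetD (dfsRun G fuel st' i (d + 1)).2 i (some u))
          else st')
        (PySem.List.pySetD st.1 u (d : Int), st.2)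
    else st

-- port of max_index
def maxIdxA (T : List Int) : Int :=
  (PySem.List.pyRange 1 (T.length : Int) 1).foldl
    (fun idx i => if PySem.List.pyGetD T idx 0 < PySem.List.pyGetD T i 0 then i else idx) 0

-- the final `for _ in range(l//2): ptr = parent[ptr]` walk (identical lines in A and B)
def parentWalk (parent : List (Option Int)) (ptr : Int) (k : Nat) : Int :=
  (List.range k).foldl (fun q _ => (PySem.List.pyGetD parent q none).getD 0) ptr

def best_root (L : List (List Int)) : Int :=
  let n := L.length
  let st0 : List Int × List (Option Int) := (List.replicate n (-1 : Int), List.replicate n none)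
  let r1 := dfsRun L (n + 1) st0 0 0
  let path_beg := maxIdxA r1.1
  let r2 := dfsRun L (n + 1) st0 path_beg 0
  let ptr := maxIdxA r2.1
  let l := PySem.List.pyGetD r2.1 ptr 0
  parentWalk r2.2 ptr ((PySem.Int.floordiv l 2).toNat)

-- ===== PORT B =====

-- iterative DFS: explicit worklist of (node, distance, parent) triples; the fuel
-- argument only makes the recursion total (one unit per pop, never exhausted)
def machRun (G : List (List Int)) :
    Nat → List Int × List (Option Int) → List (Int × Nat × Option Int) →
      List Int × List (Option Int)
  | 0, st, _ => st
  | _ + 1, st, [] => st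
  | fuel + 1, st, (u, d, p) :: S =>
    if PySem.List.pyGetD st.1 u 0 = -1 then
      machRun G fuel (PySem.List.pySetD st.1 u (d : Int), PySem.List.pySetD st.2 u p)
        (((PySem.List.pyGetD G u []).map (fun i => (i, d + 1, some u))) ++ S)
    else machRun G fuel st S

-- visited.index(max(visited))
def maxIdxB (T : List Int) : Int :=
  match PySem.List.max? T (fun x => x) with
  | none => 0
  | some m => ((PySem.List.index? T m).getD 0 : Nat)

def best_root_alt (L : List (List Int)) : Int :=
  let n := L.length
  let st0 : List Int × List (Option Int) := (List.replicate n (-1 : Int), List.replicate n none)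
  let fuel := 1 + n * ((L.map List.length).sum + 1)
  let r1 := machRun L fuel st0 [(0, 0, none)]
  let start := maxIdxB r1.1
  let r2 := machRun L fuel st0 [(start, 0, none)]
  let ptr := maxIdxB r2.1
  let l := PySem.List.pyGetD r2.1 ptr 0
  parentWalk r2.2 ptr ((PySem.Int.floordiv l 2).toNat)

-- ===== PRECONDITION & SPEC =====

-- one closure step of graph reachability over array cells: add the cell of every
-- in-range node id listed in the row of an already-reachable cell
def reachStep (L : List (List Int)) (s : List Nat) : List Nat :=
  PySem.List.dedup (s ++ s.flatMap (fun k =>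
    (L.getD k []).filterMap (fun v =>
      if -(L.length : Int) ≤ v ∧ v < (L.length : Int) then
        some ((if v < 0 then v + (L.length : Int) else v).toNat)
      else none)))

-- Pre_ excludes exactly the inputs on which A raises: the empty list (visited[0] of an
-- empty array) and adjacency lists in which some row reachable from node 0 contains a
-- node id outside [-len(L), len(L)) (IndexError on visited[i]); L.length closure steps
-- reach the fixpoint, so this is plain graph reachability, not a rerun of either port.
def Pre_best_root (L : List (List Int)) : Prop :=
  0 < L.length ∧
  ∀ k ∈ (reachStep L)^[L.length] [0],
    ∀ v ∈ L.getD k [], -(L.length : Int) ≤ v ∧ v < (L.length : Int)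
instance (L : List (List Int)) : Decidable (Pre_best_root L) := by
  unfold Pre_best_root; infer_instance

def pvWitness_best_root : List (List Int) := [[1], [0, 2], [1]]

def Spec_best_root (L : List (List Int)) (out : Int) : Prop := out = best_root_alt L
instance (L : List (List Int)) (out : Int) : Decidable (Spec_best_root L out) := by
  unfold Spec_best_root; infer_instance

-- ===== CLAIM (what is proved, stated in full; the proofs are below) =====
def Claim_equal_best_root : Prop :=
  ∀ (L : List (List Int)), Dom_best_root L → Pre_best_root L →
    Spec_best_root L (best_root L)

-- ===== LEMMAS AND PROOFS =====

-- The proof goes through well-founded twins of the two ports (dfsVisitA/dfsLoopA for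
-- the recursive DFS, machB for the worklist machine), proves those equal by a
-- simulation argument, and shows the fuelled ports never exhaust their fuel.

-- number of unvisited (-1) cells; termination measure for the DFS recursions
def cntA (v : List Int) : Nat := v.countP (fun x => x == -1)

theorem countP_set_lt (p : Int → Bool) (v : List Int) (k : Nat) (x : Int)
    (hk : k < v.length) (h1 : p (v.get ⟨k, hk⟩) = true) (h2 : p x = false) :
    (v.set k x).countP p < v.countP p := by
  induction v generalizing k with
  | nil => simp at hk
  | cons a t ih =>
    cases k with
    | zero => simp_all [List.countP_cons]
    | succ k =>
      show ((a :: t.set k x).countP p) < _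
      simp only [List.countP_cons]
      have := ih k (by simpa using hk) (by simpa using h1)
      omega

theorem pyIdx?_lt (len : Nat) (i : Int) (k : Nat) (h : PySem.List.pyIdx? len i = some k) :
    k < len := by
  unfold PySem.List.pyIdx? at h; split at h <;> split at h <;> simp_all <;> omega

theorem pyGetD_eq_getD {α : Type} (v : List α) (i : Int) (k : Nat) (d : α)
    (h : PySem.List.pyIdx? v.length i = some k) :
    PySem.List.pyGetD v i d = v.getD k d := by
  have hk := pyIdx?_lt v.length i k h
  simp [PySem.List.pyGetD, PySem.List.pyGet?, h, List.getElem?_eq_getElem hk, List.getD,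
    List.getElem?_eq_getElem]

theorem pySetD_eq_set {α : Type} (v : List α) (i : Int) (k : Nat) (x : α)
    (h : PySem.List.pyIdx? v.length i = some k) :
    PySem.List.pySetD v i x = v.set k x := by
  simp [PySem.List.pySetD, PySem.List.pySet?, h]

theorem pyIdx?_none_ops {α : Type} (v : List α) (i : Int) (d x : α)
    (h : PySem.List.pyIdx? v.length i = none) :
    PySem.List.pyGetD v i d = d ∧ PySem.List.pySetD v i x = v := by
  simp [PySem.List.pyGetD, PySem.List.pyGet?, PySem.List.pySetD, PySem.List.pySet?, h]

theorem read_neg_one (v : List Int) (i : Int) (h : PySem.List.pyGetD v i 0 = -1) :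
    ∃ k : Nat, PySem.List.pyIdx? v.length i = some k ∧ k < v.length ∧
      v.getD k 0 = -1 := by
  cases hc : PySem.List.pyIdx? v.length i with
  | none =>
    rw [(pyIdx?_none_ops v i (0:Int) 0 hc).1] at h
    exact absurd h (by norm_num)
  | some k =>
    exact ⟨k, rfl, pyIdx?_lt _ _ _ hc, by rw [← pyGetD_eq_getD v i k 0 hc]; exact h⟩

theorem cnt_set_lt (v : List Int) (i : Int) (x : Int)
    (hv : PySem.List.pyGetD v i 0 = -1) (hx : (x == -1) = false) :
    cntA (PySem.List.pySetD v i x) < cntA v := by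
  obtain ⟨k, hk, hlt, hval⟩ := read_neg_one v i hv
  rw [pySetD_eq_set v i k x hk]
  unfold cntA
  refine countP_set_lt _ v k x hlt ?_ hx
  have hg : v.get ⟨k, hlt⟩ = -1 := by
    have h2 := hval; rwa [List.getD_eq_getElem v 0 hlt] at h2
  rw [hg]; simp

mutual
-- literal port of DFS_visit (the guard `if … = -1` only makes the recursion total;
-- at every actual call site of the Python program it is true)
def dfsVisitA (G : List (List Int)) (st : List Int × List (Option Int)) (u : Int) (d : Nat) :
    {r : List Int × List (Option Int) //
      cntA r.1 ≤ cntA st.1 ∧ r.1.length = st.1.length ∧ r.2.length = st.2.length} :=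
  if h : PySem.List.pyGetD st.1 u 0 = -1 then
    let r := dfsLoopA G (PySem.List.pySetD st.1 u (d : Int), st.2) (PySem.List.pyGetD G u []) u (d + 1)
    ⟨r.val, by
      obtain ⟨h1, h2, h3⟩ := r.property
      refine ⟨le_trans h1 (le_of_lt ?_), by simpa [PySem.List.length_pySetD] using h2, h3⟩
      exact cnt_set_lt st.1 u (d : Int) h (by simp)⟩
  else ⟨st, le_refl _, rfl, rfl⟩
termination_by (cntA st.1, 0)
decreasing_by
  exact Prod.Lex.left _ _ (cnt_set_lt st.1 u (d : Int) h (by simp))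

-- the `for i in G[u]` loop of DFS_visit
def dfsLoopA (G : List (List Int)) (st : List Int × List (Option Int)) (ns : List Int)
    (u : Int) (d : Nat) :
    {r : List Int × List (Option Int) //
      cntA r.1 ≤ cntA st.1 ∧ r.1.length = st.1.length ∧ r.2.length = st.2.length} :=
  match ns with
  | [] => ⟨st, le_refl _, rfl, rfl⟩
  | i :: rest =>
    if h : PySem.List.pyGetD st.1 i 0 = -1 then
      let r1 := dfsVisitA G st i d
      let r2 := dfsLoopA G (r1.val.1, PySem.List.pySetD r1.val.2 i (some u)) rest u d
      ⟨r2.val, by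
        obtain ⟨a1, a2, a3⟩ := r1.property
        obtain ⟨b1, b2, b3⟩ := r2.property
        exact ⟨le_trans b1 a1, by rw [b2, a2], by rw [b3, PySem.List.length_pySetD, a3]⟩⟩
    else dfsLoopA G st rest u d
termination_by (cntA st.1, ns.length + 1)
decreasing_by
  · exact Prod.Lex.right _ (Nat.succ_pos _)
  · show Prod.Lex _ _ (cntA r1.val.1, rest.length + 1) (cntA st.1, (i :: rest).length + 1)
    rcases Nat.lt_or_ge (cntA r1.val.1) (cntA st.1) with hlt | hge
    · exact Prod.Lex.left _ _ hlt
    · have heq : cntA r1.val.1 = cntA st.1 := le_antisymm r1.2.1 hge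
      rw [heq]
      exact Prod.Lex.right _ (by simp only [List.length_cons]; exact Nat.lt_succ_self _)
  · exact Prod.Lex.right _ (by simp only [List.length_cons]; exact Nat.lt_succ_self _)
end

-- iterative DFS: explicit worklist of (node, distance, parent) triples
def machB (G : List (List Int)) (st : List Int × List (Option Int))
    (stack : List (Int × Nat × Option Int)) : List Int × List (Option Int) :=
  match stack with
  | [] => st
  | (u, d, p) :: S =>
    if h : PySem.List.pyGetD st.1 u 0 = -1 then
      machB G (PySem.List.pySetD st.1 u (d : Int), PySem.List.pySetD st.2 u p)
        (((PySem.List.pyGetD G u []).map (fun i => (i, d + 1, some u))) ++ S)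
    else machB G st S
termination_by (cntA st.1, stack.length)
decreasing_by
  · exact Prod.Lex.left _ _ (cnt_set_lt st.1 u (d : Int) h (by simp))
  · exact Prod.Lex.right _ (by simp only [List.length_cons]; exact Nat.lt_succ_self _)


-- ---- step (unfolding) lemmas for the three recursions ----

theorem dfsVisitA_pos (G : List (List Int)) (st : List Int × List (Option Int)) (u : Int)
    (d : Nat) (h : PySem.List.pyGetD st.1 u 0 = -1) :
    (dfsVisitA G st u d).val =
      (dfsLoopA G (PySem.List.pySetD st.1 u (d : Int), st.2)
        (PySem.List.pyGetD G u []) u (d + 1)).val := by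
  conv_lhs => rw [dfsVisitA]
  simp [h]

theorem dfsVisitA_neg (G : List (List Int)) (st : List Int × List (Option Int)) (u : Int)
    (d : Nat) (h : ¬ PySem.List.pyGetD st.1 u 0 = -1) :
    (dfsVisitA G st u d).val = st := by
  conv_lhs => rw [dfsVisitA]
  simp [h]

theorem dfsLoopA_nil (G : List (List Int)) (st : List Int × List (Option Int)) (u : Int)
    (d : Nat) : (dfsLoopA G st [] u d).val = st := by
  rw [dfsLoopA]

theorem dfsLoopA_pos (G : List (List Int)) (st : List Int × List (Option Int)) (i : Int)
    (rest : List Int) (u : Int) (d : Nat) (h : PySem.List.pyGetD st.1 i 0 = -1) :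
    (dfsLoopA G st (i :: rest) u d).val =
      (dfsLoopA G ((dfsVisitA G st i d).val.1,
        PySem.List.pySetD (dfsVisitA G st i d).val.2 i (some u)) rest u d).val := by
  conv_lhs => rw [dfsLoopA]
  simp [h]

theorem dfsLoopA_neg (G : List (List Int)) (st : List Int × List (Option Int)) (i : Int)
    (rest : List Int) (u : Int) (d : Nat) (h : ¬ PySem.List.pyGetD st.1 i 0 = -1) :
    (dfsLoopA G st (i :: rest) u d).val = (dfsLoopA G st rest u d).val := by
  conv_lhs => rw [dfsLoopA]
  simp [h]

theorem machB_nil (G : List (List Int)) (st : List Int × List (Option Int)) :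
    machB G st [] = st := by
  rw [machB]

theorem machB_pos (G : List (List Int)) (st : List Int × List (Option Int)) (u : Int)
    (d : Nat) (p : Option Int) (S : List (Int × Nat × Option Int))
    (h : PySem.List.pyGetD st.1 u 0 = -1) :
    machB G st ((u, d, p) :: S) =
      machB G (PySem.List.pySetD st.1 u (d : Int), PySem.List.pySetD st.2 u p)
        (((PySem.List.pyGetD G u []).map (fun i => (i, d + 1, some u))) ++ S) := by
  conv_lhs => rw [machB]
  simp [h]

theorem machB_neg (G : List (List Int)) (st : List Int × List (Option Int)) (u : Int)
    (d : Nat) (p : Option Int) (S : List (Int × Nat × Option Int))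
    (h : ¬ PySem.List.pyGetD st.1 u 0 = -1) :
    machB G st ((u, d, p) :: S) = machB G st S := by
  conv_lhs => rw [machB]
  simp [h]

-- ---- cell-level facts about pyGetD/pySetD ----

theorem getD_set_ne {α : Type} (p : List α) (k k' : Nat) (x dft : α) (h : k ≠ k') :
    (p.set k x).getD k' dft = p.getD k' dft := by
  by_cases hk' : k' < p.length
  · rw [List.getD_eq_getElem _ _ (by simpa using hk'), List.getD_eq_getElem _ _ hk']
    exact List.getElem_set_ne h _
  · rw [List.getD_eq_default _ _ (by simpa using Nat.le_of_not_lt hk'),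
      List.getD_eq_default _ _ (Nat.le_of_not_lt hk')]

theorem set_self_of_getD {α : Type} (p : List α) (k : Nat) (x : α) (hk : k < p.length)
    (h : p.getD k x = x) : p.set k x = p := by
  apply List.ext_getElem (by simp)
  intro j hj hj'
  by_cases hjk : j = k
  · subst hjk
    rw [List.getElem_set_self]
    rw [List.getD_eq_getElem _ _ hk] at h
    exact h.symm
  · exact List.getElem_set_ne (fun hh => hjk hh.symm) _

theorem pyGetD_pySetD_self (v : List Int) (u : Int) (x : Int)
    (hu : PySem.List.pyGetD v u 0 = -1) :
    PySem.List.pyGetD (PySem.List.pySetD v u x) u 0 = x := by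
  obtain ⟨k, hk, hlt, _⟩ := read_neg_one v u hu
  rw [pySetD_eq_set v u k x hk]
  rw [pyGetD_eq_getD _ u k 0 (by simpa using hk)]
  rw [List.getD_eq_getElem _ _ (by simpa using hlt)]
  exact List.getElem_set_self ..

theorem pyGetD_pySetD_ne' {α : Type} (v : List Int) (p : List α) (hlen : p.length = v.length)
    (u c : Int) (x dft : α)
    (hu : PySem.List.pyGetD v u 0 = -1) (hc : PySem.List.pyGetD v c 0 ≠ -1) :
    PySem.List.pyGetD (PySem.List.pySetD p u x) c dft = PySem.List.pyGetD p c dft := by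
  obtain ⟨k, hk, hlt, hval⟩ := read_neg_one v u hu
  have hkp : PySem.List.pyIdx? p.length u = some k := by rw [hlen]; exact hk
  rw [pySetD_eq_set p u k x hkp]
  cases hcc : PySem.List.pyIdx? v.length c with
  | none =>
    have h1 : PySem.List.pyIdx? (p.set k x).length c = none := by
      rw [List.length_set, hlen]; exact hcc
    have h2 : PySem.List.pyIdx? p.length c = none := by rw [hlen]; exact hcc
    rw [(pyIdx?_none_ops (p.set k x) c dft x h1).1, (pyIdx?_none_ops p c dft x h2).1]
  | some k' =>
    have hkk : k ≠ k' := by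
      intro hh; subst hh
      exact hc (by rw [pyGetD_eq_getD v c k 0 hcc]; exact hval)
    have h1 : PySem.List.pyIdx? (p.set k x).length c = some k' := by
      rw [List.length_set, hlen]; exact hcc
    have h2 : PySem.List.pyIdx? p.length c = some k' := by rw [hlen]; exact hcc
    rw [pyGetD_eq_getD _ c k' dft h1, pyGetD_eq_getD _ c k' dft h2]
    exact getD_set_ne p k k' x dft hkk

theorem pyGetD_pySetD_ne (v : List Int) (u c x : Int)
    (hu : PySem.List.pyGetD v u 0 = -1) (hc : PySem.List.pyGetD v c 0 ≠ -1) :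
    PySem.List.pyGetD (PySem.List.pySetD v u x) c 0 = PySem.List.pyGetD v c 0 :=
  pyGetD_pySetD_ne' v v rfl u c x 0 hu hc

theorem pySetD_comm' {α : Type} (v : List Int) (p : List α) (hlen : p.length = v.length)
    (i c : Int) (a x : α)
    (hi : PySem.List.pyGetD v i 0 = -1) (hc : PySem.List.pyGetD v c 0 ≠ -1) :
    PySem.List.pySetD (PySem.List.pySetD p c x) i a =
      PySem.List.pySetD (PySem.List.pySetD p i a) c x := by
  obtain ⟨k, hk, hlt, hval⟩ := read_neg_one v i hi
  have hkp : PySem.List.pyIdx? p.length i = some k := by rw [hlen]; exact hk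
  cases hcc : PySem.List.pyIdx? v.length c with
  | none =>
    have h2 : PySem.List.pyIdx? p.length c = none := by rw [hlen]; exact hcc
    have h3 : PySem.List.pyIdx? (p.set k a).length c = none := by
      rw [List.length_set, hlen]; exact hcc
    rw [(pyIdx?_none_ops p c x x h2).2, pySetD_eq_set p i k a hkp,
      (pyIdx?_none_ops (p.set k a) c x x h3).2]
  | some k' =>
    have hkk : k ≠ k' := by
      intro hh; subst hh
      exact hc (by rw [pyGetD_eq_getD v c k 0 hcc]; exact hval)
    have h2 : PySem.List.pyIdx? p.length c = some k' := by rw [hlen]; exact hcc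
    have h3 : PySem.List.pyIdx? (p.set k a).length c = some k' := by
      rw [List.length_set, hlen]; exact hcc
    have h4 : PySem.List.pyIdx? (p.set k' x).length i = some k := by
      rw [List.length_set, hlen]; exact hk
    rw [pySetD_eq_set p c k' x h2, pySetD_eq_set p i k a hkp,
      pySetD_eq_set _ i k a h4, pySetD_eq_set _ c k' x h3]
    exact List.set_comm _ _ (Ne.symm hkk)

-- ---- the visited component does not depend on the parent array ----

theorem vis_indep (G : List (List Int)) :
    (∀ (st : List Int × List (Option Int)) (u : Int) (d : Nat),
        ∀ q : List (Option Int),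
          (dfsVisitA G (st.1, q) u d).val.1 = (dfsVisitA G st u d).val.1) ∧
    (∀ (st : List Int × List (Option Int)) (ns : List Int) (u : Int) (d : Nat),
        ∀ q : List (Option Int),
          (dfsLoopA G (st.1, q) ns u d).val.1 = (dfsLoopA G st ns u d).val.1) := by
  have H := dfsVisitA.mutual_induct G
    (fun st u d => ∀ q : List (Option Int),
      (dfsVisitA G (st.1, q) u d).val.1 = (dfsVisitA G st u d).val.1)
    (fun st ns u d => ∀ q : List (Option Int),
      (dfsLoopA G (st.1, q) ns u d).val.1 = (dfsLoopA G st ns u d).val.1)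
  refine H ?_ ?_ ?_ ?_ ?_
  · intro st u d h ih q
    rw [dfsVisitA_pos G (st.1, q) u d (by simpa using h), dfsVisitA_pos G st u d h]
    exact ih q
  · intro st u d h q
    rw [dfsVisitA_neg G (st.1, q) u d (by simpa using h), dfsVisitA_neg G st u d h]
  · intro st u d q
    rw [dfsLoopA_nil, dfsLoopA_nil]
  · intro st u d i rest h _r1 ih1 _ ih2 q
    rw [dfsLoopA_pos G (st.1, q) i rest u d (by simpa using h), dfsLoopA_pos G st i rest u d h]
    rw [ih1 q]
    exact ih2 (PySem.List.pySetD (dfsVisitA G (st.1, q) i d).val.2 i (some u))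
  · intro st u d i rest h ih q
    rw [dfsLoopA_neg G (st.1, q) i rest u d (by simpa using h), dfsLoopA_neg G st i rest u d h]
    exact ih q

-- ---- already-visited cells (and their parent entries) are never touched ----

theorem dfs_mono (G : List (List Int)) :
    (∀ (st : List Int × List (Option Int)) (u : Int) (d : Nat),
        st.2.length = st.1.length → ∀ c : Int,
        PySem.List.pyGetD st.1 c 0 ≠ -1 →
          PySem.List.pyGetD (dfsVisitA G st u d).val.1 c 0 = PySem.List.pyGetD st.1 c 0 ∧
          ∀ dft, PySem.List.pyGetD (dfsVisitA G st u d).val.2 c dft =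
            PySem.List.pyGetD st.2 c dft) ∧
    (∀ (st : List Int × List (Option Int)) (ns : List Int) (u : Int) (d : Nat),
        st.2.length = st.1.length → ∀ c : Int,
        PySem.List.pyGetD st.1 c 0 ≠ -1 →
          PySem.List.pyGetD (dfsLoopA G st ns u d).val.1 c 0 = PySem.List.pyGetD st.1 c 0 ∧
          ∀ dft, PySem.List.pyGetD (dfsLoopA G st ns u d).val.2 c dft =
            PySem.List.pyGetD st.2 c dft) := by
  have H := dfsVisitA.mutual_induct G
    (fun st u d => st.2.length = st.1.length → ∀ c : Int,
      PySem.List.pyGetD st.1 c 0 ≠ -1 →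
      PySem.List.pyGetD (dfsVisitA G st u d).val.1 c 0 = PySem.List.pyGetD st.1 c 0 ∧
      ∀ dft, PySem.List.pyGetD (dfsVisitA G st u d).val.2 c dft =
        PySem.List.pyGetD st.2 c dft)
    (fun st ns u d => st.2.length = st.1.length → ∀ c : Int,
      PySem.List.pyGetD st.1 c 0 ≠ -1 →
      PySem.List.pyGetD (dfsLoopA G st ns u d).val.1 c 0 = PySem.List.pyGetD st.1 c 0 ∧
      ∀ dft, PySem.List.pyGetD (dfsLoopA G st ns u d).val.2 c dft =
        PySem.List.pyGetD st.2 c dft)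
  refine H ?_ ?_ ?_ ?_ ?_
  · intro st u d h ih hlen c hc
    rw [dfsVisitA_pos G st u d h]
    have hc1 : PySem.List.pyGetD (PySem.List.pySetD st.1 u (d : Int)) c 0 =
        PySem.List.pyGetD st.1 c 0 := pyGetD_pySetD_ne st.1 u c (d : Int) h hc
    have hlen' : ((PySem.List.pySetD st.1 u (d : Int), st.2) :
        List Int × List (Option Int)).2.length =
        (PySem.List.pySetD st.1 u (d : Int)).length := by
      simp [PySem.List.length_pySetD, hlen]
    have := ih hlen' c (by simpa [hc1] using hc)
    exact ⟨by rw [this.1]; simpa using hc1, fun dft => by simpa using this.2 dft⟩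
  · intro st u d h hlen c hc
    rw [dfsVisitA_neg G st u d h]
    exact ⟨rfl, fun _ => rfl⟩
  · intro st u d hlen c hc
    rw [dfsLoopA_nil]
    exact ⟨rfl, fun _ => rfl⟩
  · intro st u d i rest h _r1 ih1 _ ih2 hlen c hc
    rw [dfsLoopA_pos G st i rest u d h]
    have h1 := ih1 hlen c hc
    have hp := (dfsVisitA G st i d).property
    have hlen2 : ((dfsVisitA G st i d).val.1,
        PySem.List.pySetD (dfsVisitA G st i d).val.2 i (some u)).2.length =
        (dfsVisitA G st i d).val.1.length := by
      simp [PySem.List.length_pySetD, hp.2.2, hp.2.1, hlen]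
    have hc2 : PySem.List.pyGetD (dfsVisitA G st i d).val.1 c 0 ≠ -1 := by
      rw [h1.1]; exact hc
    have h2 := ih2 hlen2 c (by simpa using hc2)
    refine ⟨by rw [h2.1]; simpa using h1.1, fun dft => ?_⟩
    rw [h2.2 dft]
    have hcomm : PySem.List.pyGetD
        (PySem.List.pySetD (dfsVisitA G st i d).val.2 i (some u)) c dft =
        PySem.List.pyGetD (dfsVisitA G st i d).val.2 c dft :=
      pyGetD_pySetD_ne' st.1 (dfsVisitA G st i d).val.2
        (by rw [hp.2.2, hlen]) i c (some u) dft h hc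
    simpa [hcomm] using h1.2 dft
  · intro st u d i rest h ih hlen c hc
    rw [dfsLoopA_neg G st i rest u d h]
    exact ih hlen c hc
-- ---- writing a parent entry of an already-visited cell commutes with the DFS ----

theorem dfs_comm (G : List (List Int)) :
    (∀ (st : List Int × List (Option Int)) (u : Int) (d : Nat),
        st.2.length = st.1.length → ∀ (c : Int) (x : Option Int),
        PySem.List.pyGetD st.1 c 0 ≠ -1 →
          (dfsVisitA G (st.1, PySem.List.pySetD st.2 c x) u d).val =
            ((dfsVisitA G st u d).val.1,
              PySem.List.pySetD (dfsVisitA G st u d).val.2 c x)) ∧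
    (∀ (st : List Int × List (Option Int)) (ns : List Int) (u : Int) (d : Nat),
        st.2.length = st.1.length → ∀ (c : Int) (x : Option Int),
        PySem.List.pyGetD st.1 c 0 ≠ -1 →
          (dfsLoopA G (st.1, PySem.List.pySetD st.2 c x) ns u d).val =
            ((dfsLoopA G st ns u d).val.1,
              PySem.List.pySetD (dfsLoopA G st ns u d).val.2 c x)) := by
  have H := dfsVisitA.mutual_induct G
    (fun st u d => st.2.length = st.1.length → ∀ (c : Int) (x : Option Int),
      PySem.List.pyGetD st.1 c 0 ≠ -1 →
        (dfsVisitA G (st.1, PySem.List.pySetD st.2 c x) u d).val =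
          ((dfsVisitA G st u d).val.1, PySem.List.pySetD (dfsVisitA G st u d).val.2 c x))
    (fun st ns u d => st.2.length = st.1.length → ∀ (c : Int) (x : Option Int),
      PySem.List.pyGetD st.1 c 0 ≠ -1 →
        (dfsLoopA G (st.1, PySem.List.pySetD st.2 c x) ns u d).val =
          ((dfsLoopA G st ns u d).val.1, PySem.List.pySetD (dfsLoopA G st ns u d).val.2 c x))
  refine H ?_ ?_ ?_ ?_ ?_
  · intro st u d h ih hlen c x hc
    rw [dfsVisitA_pos G (st.1, PySem.List.pySetD st.2 c x) u d (by simpa using h),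
      dfsVisitA_pos G st u d h]
    have hlen' : st.2.length = (PySem.List.pySetD st.1 u (d : Int)).length := by
      simp [PySem.List.length_pySetD, hlen]
    have hc' : PySem.List.pyGetD (PySem.List.pySetD st.1 u (d : Int)) c 0 ≠ -1 := by
      rw [pyGetD_pySetD_ne st.1 u c (d : Int) h hc]; exact hc
    simpa using ih hlen' c x hc'
  · intro st u d h hlen c x hc
    rw [dfsVisitA_neg G (st.1, PySem.List.pySetD st.2 c x) u d (by simpa using h),
      dfsVisitA_neg G st u d h]
  · intro st u d hlen c x hc
    rw [dfsLoopA_nil, dfsLoopA_nil]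
  · intro st u d i rest h _r1 ih1 _ ih2 hlen c x hc
    rw [dfsLoopA_pos G (st.1, PySem.List.pySetD st.2 c x) i rest u d (by simpa using h),
      dfsLoopA_pos G st i rest u d h]
    have hv := ih1 hlen c x hc
    rw [hv]
    have hp := (dfsVisitA G st i d).property
    have hcomm : PySem.List.pySetD (PySem.List.pySetD (dfsVisitA G st i d).val.2 c x) i
        (some u) = PySem.List.pySetD
          (PySem.List.pySetD (dfsVisitA G st i d).val.2 i (some u)) c x :=
      pySetD_comm' st.1 (dfsVisitA G st i d).val.2 (by rw [hp.2.2, hlen]) i c (some u) x h hc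
    have hlen2 : (PySem.List.pySetD (dfsVisitA G st i d).val.2 i (some u)).length =
        (dfsVisitA G st i d).val.1.length := by
      simp [PySem.List.length_pySetD, hp.2.2, hp.2.1, hlen]
    have hc2 : PySem.List.pyGetD (dfsVisitA G st i d).val.1 c 0 ≠ -1 := by
      rw [((dfs_mono G).1 st i d hlen c hc).1]; exact hc
    have := ih2 hlen2 c x (by simpa using hc2)
    simp only at this
    rw [← hcomm] at this
    simpa using this
  · intro st u d i rest h ih hlen c x hc
    rw [dfsLoopA_neg G (st.1, PySem.List.pySetD st.2 c x) i rest u d (by simpa using h),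
      dfsLoopA_neg G st i rest u d h]
    exact ih hlen c x hc

-- ---- the stack machine simulates the recursive DFS ----

theorem mach_sim (G : List (List Int)) :
    (∀ (st : List Int × List (Option Int)) (u : Int) (d : Nat),
        ∀ (q : List (Option Int)), q.length = st.1.length →
          ∀ (p : Option Int) (S : List (Int × Nat × Option Int)),
          machB G (st.1, q) ((u, d, p) :: S) =
            machB G (if PySem.List.pyGetD st.1 u 0 = -1 then
                ((dfsVisitA G (st.1, q) u d).val.1,
                  PySem.List.pySetD (dfsVisitA G (st.1, q) u d).val.2 u p)
              else (st.1, q)) S) ∧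
    (∀ (st : List Int × List (Option Int)) (ns : List Int) (u : Int) (d : Nat),
        ∀ (q : List (Option Int)), q.length = st.1.length →
          ∀ (S : List (Int × Nat × Option Int)),
          machB G (st.1, q) ((ns.map (fun i => (i, d, some u))) ++ S) =
            machB G (dfsLoopA G (st.1, q) ns u d).val S) := by
  have H := dfsVisitA.mutual_induct G
    (fun st u d => ∀ (q : List (Option Int)), q.length = st.1.length →
      ∀ (p : Option Int) (S : List (Int × Nat × Option Int)),
      machB G (st.1, q) ((u, d, p) :: S) =
        machB G (if PySem.List.pyGetD st.1 u 0 = -1 then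
            ((dfsVisitA G (st.1, q) u d).val.1,
              PySem.List.pySetD (dfsVisitA G (st.1, q) u d).val.2 u p)
          else (st.1, q)) S)
    (fun st ns u d => ∀ (q : List (Option Int)), q.length = st.1.length →
      ∀ (S : List (Int × Nat × Option Int)),
      machB G (st.1, q) ((ns.map (fun i => (i, d, some u))) ++ S) =
        machB G (dfsLoopA G (st.1, q) ns u d).val S)
  refine H ?_ ?_ ?_ ?_ ?_
  · intro st u d h ih q hq p S
    rw [machB_pos G (st.1, q) u d p S (by simpa using h), if_pos h]
    have hq' : (PySem.List.pySetD q u p).length =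
        ((PySem.List.pySetD st.1 u (d : Int), st.2) :
          List Int × List (Option Int)).1.length := by
      simp [PySem.List.length_pySetD, hq]
    have hstep := ih (PySem.List.pySetD q u p) hq' S
    simp only at hstep
    rw [hstep]
    -- now commute the early parent write with the loop
    rw [dfsVisitA_pos G (st.1, q) u d (by simpa using h)]
    have hcmm := (dfs_comm G).2 (PySem.List.pySetD st.1 u (d : Int), q)
      (PySem.List.pyGetD G u []) u (d + 1)
      (by simp [PySem.List.length_pySetD, hq]) u p
      (by rw [pyGetD_pySetD_self st.1 u (d : Int) h]; simp)
    simp only at hcmm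
    rw [hcmm]
  · intro st u d h q hq p S
    rw [machB_neg G (st.1, q) u d p S (by simpa using h), if_neg h]
  · intro st u d q hq S
    simp only [List.map_nil, List.nil_append]
    rw [dfsLoopA_nil]
  · intro st u d i rest h _r1 ih1 _ ih2 q hq S
    simp only [List.map_cons, List.cons_append]
    rw [ih1 q hq (some u) (rest.map (fun j => (j, d, some u)) ++ S), if_pos h]
    rw [dfsLoopA_pos G (st.1, q) i rest u d (by simpa using h)]
    have hvq := (vis_indep G).1 st i d q
    have hp := (dfsVisitA G st i d).property
    have hpq := (dfsVisitA G (st.1, q) i d).property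
    have hq2 : (PySem.List.pySetD (dfsVisitA G (st.1, q) i d).val.2 i (some u)).length =
        (dfsVisitA G st i d).val.1.length := by
      have : (dfsVisitA G (st.1, q) i d).val.2.length = q.length := by
        simpa using hpq.2.2
      simp [PySem.List.length_pySetD, this, hq, hp.2.1]
    have := ih2 (PySem.List.pySetD (dfsVisitA G (st.1, q) i d).val.2 i (some u)) hq2 S
    rw [hvq]
    simpa using this
  · intro st u d i rest h ih q hq S
    simp only [List.map_cons, List.cons_append]
    rw [machB_neg G (st.1, q) i d (some u) _ (by simpa using h)]
    rw [ih q hq S]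
    rw [dfsLoopA_neg G (st.1, q) i rest u d (by simpa using h)]
-- ---- the two DFS implementations produce the same state from a fresh start ----

theorem dfs_eq (G : List (List Int)) (n : Nat) (u : Int) :
    machB G (List.replicate n (-1 : Int), List.replicate n (none : Option Int)) [(u, 0, none)] =
      (dfsVisitA G (List.replicate n (-1 : Int), List.replicate n (none : Option Int)) u 0).val := by
  have h1 := (mach_sim G).1 (List.replicate n (-1 : Int), List.replicate n (none : Option Int))
    u 0 (List.replicate n (none : Option Int)) (by simp) none []
  simp only at h1
  rw [h1]
  by_cases h : PySem.List.pyGetD (List.replicate n (-1 : Int)) u 0 = -1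
  · rw [if_pos h, machB_nil]
    obtain ⟨k, hk, hklt, _⟩ := read_neg_one (List.replicate n (-1 : Int)) u h
    have hlenn : (List.replicate n (-1 : Int)).length = n := by simp
    -- the parent entry of the root is never written: it stays none
    have hmono := (dfs_mono G).2
      (PySem.List.pySetD (List.replicate n (-1 : Int)) u ((0 : Nat) : Int),
        List.replicate n (none : Option Int))
      (PySem.List.pyGetD G u []) u 1
      (by simp [PySem.List.length_pySetD]) u
      (by rw [pyGetD_pySetD_self (List.replicate n (-1 : Int)) u ((0 : Nat) : Int) h]; simp)
    have hpos := dfsVisitA_pos G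
      (List.replicate n (-1 : Int), List.replicate n (none : Option Int)) u 0 h
    have hpp := (dfsVisitA G
      (List.replicate n (-1 : Int), List.replicate n (none : Option Int)) u 0).property
    have hplen : (dfsVisitA G
        (List.replicate n (-1 : Int), List.replicate n (none : Option Int)) u 0).val.2.length
        = n := by simpa using hpp.2.2
    have hkq : PySem.List.pyIdx? (dfsVisitA G
        (List.replicate n (-1 : Int), List.replicate n (none : Option Int)) u 0).val.2.length u
        = some k := by rw [hplen, ← hlenn]; exact hk
    have hread : PySem.List.pyGetD (dfsVisitA G
        (List.replicate n (-1 : Int), List.replicate n (none : Option Int)) u 0).val.2 u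
        (some 0) = none := by
      rw [hpos]
      have := (hmono.2 (some 0))
      simp only at this
      rw [this]
      rw [pyGetD_eq_getD _ u k (some 0) (by simpa using hk)]
      rw [List.getD_eq_getElem _ _ (by simpa using hklt)]
      simp
    have helem : (dfsVisitA G
        (List.replicate n (-1 : Int), List.replicate n (none : Option Int)) u 0).val.2[k]'
        (by rw [hplen]; rwa [hlenn] at hklt) = none := by
      rw [pyGetD_eq_getD _ u k (some 0) hkq] at hread
      rwa [List.getD_eq_getElem _ _ (by rw [hplen]; rwa [hlenn] at hklt)] at hread
    have : PySem.List.pySetD (dfsVisitA G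
        (List.replicate n (-1 : Int), List.replicate n (none : Option Int)) u 0).val.2 u none
        = (dfsVisitA G
            (List.replicate n (-1 : Int), List.replicate n (none : Option Int)) u 0).val.2 := by
      rw [pySetD_eq_set _ u k none hkq]
      exact set_self_of_getD _ k none (by rw [hplen]; rwa [hlenn] at hklt)
        (by rw [List.getD_eq_getElem _ _ (by rw [hplen]; rwa [hlenn] at hklt)]; exact helem)
    rw [this]
  · rw [if_neg h, machB_nil, dfsVisitA_neg G _ u 0 (by simpa using h)]

-- ---- the two argmax implementations agree ----

theorem pyIdx?_of_nonneg (n : Nat) (j : Int) (h0 : 0 ≤ j) (hj : j < (n : Int)) :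
    PySem.List.pyIdx? n j = some j.toNat := by
  unfold PySem.List.pyIdx?
  rw [if_pos h0, if_pos hj]

theorem getD_append_left {α : Type} (l l' : List α) (n : Nat) (d : α) (h : n < l.length) :
    (l ++ l').getD n d = l.getD n d := by
  rw [List.getD_eq_getElem _ _ (by simp; omega), List.getD_eq_getElem _ _ h]
  exact List.getElem_append_left h

theorem pyGetD_append (T : List Int) (y : Int) (j : Int) (h0 : 0 ≤ j)
    (hj : j < (T.length : Int)) :
    PySem.List.pyGetD (T ++ [y]) j 0 = PySem.List.pyGetD T j 0 := by
  rw [pyGetD_eq_getD (T ++ [y]) j j.toNat 0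
      (by rw [pyIdx?_of_nonneg _ j h0 (by simp; omega)]),
    pyGetD_eq_getD T j j.toNat 0 (by rw [pyIdx?_of_nonneg _ j h0 hj])]
  exact getD_append_left T [y] j.toNat 0 (by omega)

theorem maxfold_ext (T : List Int) (y : Int) :
    ∀ (R : List Int) (acc : Int), (∀ i ∈ R, 0 ≤ i ∧ i < (T.length : Int)) →
      0 ≤ acc → acc < (T.length : Int) →
      R.foldl (fun idx i => if PySem.List.pyGetD (T ++ [y]) idx 0 <
          PySem.List.pyGetD (T ++ [y]) i 0 then i else idx) acc
        = R.foldl (fun idx i => if PySem.List.pyGetD T idx 0 <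
            PySem.List.pyGetD T i 0 then i else idx) acc := by
  intro R
  induction R with
  | nil => intro acc _ _ _; rfl
  | cons a R ih =>
    intro acc hmem h0 hlt
    simp only [List.foldl_cons]
    have ha := hmem a (List.mem_cons_self ..)
    rw [pyGetD_append T y acc h0 hlt, pyGetD_append T y a ha.1 ha.2]
    by_cases hcmp : PySem.List.pyGetD T acc 0 < PySem.List.pyGetD T a 0
    · rw [if_pos hcmp]
      exact ih a (fun i hi => hmem i (List.mem_cons_of_mem _ hi)) ha.1 ha.2
    · rw [if_neg hcmp]
      exact ih acc (fun i hi => hmem i (List.mem_cons_of_mem _ hi)) h0 hlt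

theorem maxA_spec (T : List Int) (h : T ≠ []) :
    ∃ k : Nat, maxIdxA T = (k : Int) ∧ k < T.length ∧
      (∀ j : Nat, j < T.length → T.getD j 0 ≤ T.getD k 0) ∧
      (∀ j : Nat, j < k → T.getD j 0 < T.getD k 0) := by
  induction T using List.reverseRecOn with
  | nil => exact absurd rfl h
  | append_singleton T y ih =>
    by_cases hT : T = []
    · subst hT
      refine ⟨0, ?_, by simp, ?_, ?_⟩
      · unfold maxIdxA
        rw [show (([] ++ [y] : List Int).length : Int) = 1 by simp]
        rw [PySem.List.pyRange_one_eq_nil (by norm_num)]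
        rfl
      · intro j hj
        have hj0 : j = 0 := by simpa using hj
        subst hj0
        exact le_refl _
      · intro j hj
        exact absurd hj (Nat.not_lt_zero j)
    · obtain ⟨k, hk1, hk2, hmax, hfirst⟩ := ih hT
      have hN : 0 < T.length := List.length_pos_of_ne_nil hT
      have hrange : PySem.List.pyRange 1 ((T ++ [y]).length : Int) 1 =
          PySem.List.pyRange 1 (T.length : Int) 1 ++ [(T.length : Int)] := by
        rw [show ((T ++ [y]).length : Int) = (T.length : Int) + 1 by simp]
        exact PySem.List.pyRange_one_succ_right (a := 1) (b := (T.length : Int)) (by omega)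
      have e1 : maxIdxA (T ++ [y]) =
          (if PySem.List.pyGetD (T ++ [y]) (maxIdxA T) 0 <
              PySem.List.pyGetD (T ++ [y]) (T.length : Int) 0
           then (T.length : Int) else maxIdxA T) := by
        unfold maxIdxA
        rw [hrange, List.foldl_append]
        simp only [List.foldl_cons, List.foldl_nil]
        rw [maxfold_ext T y (PySem.List.pyRange 1 (T.length : Int) 1) 0
          (fun i hi => by
            have := (PySem.List.mem_pyRange_one).mp hi
            exact ⟨by omega, this.2⟩)
          (le_refl 0) (by exact_mod_cast hN)]
      have hky : PySem.List.pyGetD (T ++ [y]) (maxIdxA T) 0 = T.getD k 0 := by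
        rw [hk1, pyGetD_append T y (k : Int) (by omega) (by exact_mod_cast hk2)]
        simp
      have hNy : PySem.List.pyGetD (T ++ [y]) (T.length : Int) 0 = y := by
        rw [pyGetD_eq_getD (T ++ [y]) (T.length : Int) T.length 0
          (by rw [pyIdx?_of_nonneg _ _ (by omega) (by simp)]; simp)]
        rw [List.getD_eq_getElem _ _ (by simp)]
        simp
      rw [hky, hNy] at e1
      by_cases hcmp : T.getD k 0 < y
      · refine ⟨T.length, by rw [e1, if_pos hcmp], by simp, ?_, ?_⟩
        · intro j hj
          have hgy : (T ++ [y]).getD T.length 0 = y := by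
            rw [List.getD_eq_getElem _ _ (by simp)]
            simp
          rw [hgy]
          rcases Nat.lt_or_ge j T.length with hjN | hjN
          · rw [getD_append_left T [y] j 0 hjN]
            exact le_of_lt (lt_of_le_of_lt (hmax j hjN) hcmp)
          · have : j = T.length := by simp at hj; omega
            subst this
            rw [hgy]
        · intro j hj
          have hgy : (T ++ [y]).getD T.length 0 = y := by
            rw [List.getD_eq_getElem _ _ (by simp)]
            simp
          rw [hgy, getD_append_left T [y] j 0 hj]
          exact lt_of_le_of_lt (hmax j hj) hcmp
      · refine ⟨k, by rw [e1, if_neg hcmp, hk1], by simp; omega, ?_, ?_⟩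
        · intro j hj
          rw [getD_append_left T [y] k 0 hk2]
          rcases Nat.lt_or_ge j T.length with hjN | hjN
          · rw [getD_append_left T [y] j 0 hjN]
            exact hmax j hjN
          · have : j = T.length := by simp at hj; omega
            subst this
            have hgy : (T ++ [y]).getD T.length 0 = y := by
              rw [List.getD_eq_getElem _ _ (by simp)]
              simp
            rw [hgy]
            omega
        · intro j hj
          rw [getD_append_left T [y] k 0 hk2, getD_append_left T [y] j 0 (by omega)]
          exact hfirst j hj

theorem maxB_of_spec (T : List Int) (hT : T ≠ []) (k : Nat) (hk : k < T.length)
    (hmax : ∀ j : Nat, j < T.length → T.getD j 0 ≤ T.getD k 0)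
    (hfirst : ∀ j : Nat, j < k → T.getD j 0 < T.getD k 0) :
    maxIdxB T = (k : Int) := by
  cases T with
  | nil => exact absurd rfl hT
  | cons x t =>
    have hgoal : maxIdxB (x :: t) =
        (((PySem.List.index? (x :: t) (t.foldl max x)).getD 0 : Nat) : Int) := by
      unfold maxIdxB
      rw [PySem.List.max?_id_cons]
    rw [hgoal]
    have hmem : t.foldl max x ∈ x :: t := by
      rcases PySem.List.foldl_max_mem t x with hh | hh
      · rw [hh]; exact List.mem_cons_self ..
      · exact List.mem_cons_of_mem _ hh
    have hub := PySem.List.le_foldl_max t x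
    have hmle : t.foldl max x ≤ (x :: t).getD k 0 := by
      obtain ⟨j, hj, hjm⟩ := List.getElem_of_mem hmem
      rw [← hjm, ← List.getD_eq_getElem (x :: t) 0 hj]
      exact hmax j hj
    have hgem : (x :: t).getD k 0 ≤ t.foldl max x := by
      rw [List.getD_eq_getElem _ _ hk]
      have hmem2 : (x :: t)[k]'hk ∈ x :: t := List.getElem_mem _
      rcases List.mem_cons.mp hmem2 with hh | hh
      · rw [hh]; exact hub.1
      · exact hub.2 _ hh
    have hm : t.foldl max x = (x :: t).getD k 0 := le_antisymm hmle hgem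
    have hidx : PySem.List.index? (x :: t) (t.foldl max x) = some k := by
      rw [PySem.List.index?_eq_some_iff]
      refine ⟨(x :: t).take k, (x :: t).drop (k + 1), ?_, by
        rw [List.length_take]; omega, ?_⟩
      · conv_lhs => rw [← List.take_append_drop k (x :: t)]
        congr 1
        rw [List.drop_eq_getElem_cons hk]
        congr 1
        rw [hm, List.getD_eq_getElem _ _ hk]
      · intro hmem'
        obtain ⟨j, hj, hjm⟩ := List.getElem_of_mem hmem'
        have hjk : j < k := by
          rw [List.length_take] at hj; omega
        have hje : (x :: t).getD j 0 = t.foldl max x := by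
          rw [List.getD_eq_getElem _ _ (by omega)]
          rw [← hjm]
          exact (List.getElem_take ..).symm
        have := hfirst j hjk
        rw [hje, hm] at this
        exact absurd this (lt_irrefl _)
    rw [hidx]
    simp

theorem maxIdx_eq (T : List Int) : maxIdxA T = maxIdxB T := by
  by_cases hT : T = []
  · subst hT
    unfold maxIdxA maxIdxB
    rw [show ((([] : List Int)).length : Int) = 0 by simp]
    rw [PySem.List.pyRange_one_eq_nil (by norm_num)]
    rfl
  · obtain ⟨k, hk1, hk2, hmax, hfirst⟩ := maxA_spec T hT
    rw [hk1, maxB_of_spec T hT k hk2 hmax hfirst]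

-- ---- the fuelled ports never exhaust their fuel ----

theorem cnt_replicate (n : Nat) : cntA (List.replicate n (-1 : Int)) = n := by
  induction n with
  | zero => rfl
  | succ n ih => simp [cntA, List.replicate_succ, List.countP_cons] at ih ⊢; omega

theorem dfs_fuel (G : List (List Int)) : ∀ fuel : Nat,
    (∀ st u d, cntA st.1 < fuel → dfsRun G fuel st u d = (dfsVisitA G st u d).val) ∧
    (∀ (st : List Int × List (Option Int)) (ns : List Int) (u : Int) (d : Nat),
      cntA st.1 < fuel →
      ns.foldl
        (fun st' i =>
          if PySem.List.pyGetD st'.1 i 0 = -1 then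
            ((dfsRun G fuel st' i d).1,
              PySem.List.pySetD (dfsRun G fuel st' i d).2 i (some u))
          else st') st
        = (dfsLoopA G st ns u d).val) := by
  intro fuel
  induction fuel with
  | zero =>
    exact ⟨fun st u d h => absurd h (Nat.not_lt_zero _),
      fun st ns u d h => absurd h (Nat.not_lt_zero _)⟩
  | succ fuel ih =>
    have hP : ∀ st u d, cntA st.1 < fuel + 1 →
        dfsRun G (fuel + 1) st u d = (dfsVisitA G st u d).val := by
      intro st u d h
      by_cases hg : PySem.List.pyGetD st.1 u 0 = -1
      · rw [dfsVisitA_pos G st u d hg]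
        show (if _ = -1 then _ else _) = _
        rw [if_pos hg]
        have hc : cntA (PySem.List.pySetD st.1 u (d : Int)) < fuel :=
          Nat.lt_of_lt_of_le (cnt_set_lt st.1 u (d : Int) hg (by simp)) (by omega)
        exact ih.2 (PySem.List.pySetD st.1 u (d : Int), st.2)
          (PySem.List.pyGetD G u []) u (d + 1) hc
      · rw [dfsVisitA_neg G st u d hg]
        show (if _ = -1 then _ else _) = _
        rw [if_neg hg]
    refine ⟨hP, ?_⟩
    intro st ns u d h
    induction ns generalizing st with
    | nil => rw [dfsLoopA_nil]; rfl
    | cons i rest ihl =>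
      rw [List.foldl_cons]
      by_cases hg : PySem.List.pyGetD st.1 i 0 = -1
      · rw [if_pos hg, dfsLoopA_pos G st i rest u d hg, hP st i d h]
        exact ihl ((dfsVisitA G st i d).val.1,
          PySem.List.pySetD (dfsVisitA G st i d).val.2 i (some u))
          (Nat.lt_of_le_of_lt (dfsVisitA G st i d).property.1 h)
      · rw [if_neg hg, dfsLoopA_neg G st i rest u d hg]
        exact ihl st h

theorem row_le_sum (G : List (List Int)) (u : Int) :
    (PySem.List.pyGetD G u []).length ≤ (G.map List.length).sum := by
  cases hc : PySem.List.pyIdx? G.length u with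
  | none => rw [(pyIdx?_none_ops G u [] [] hc).1]; simp
  | some k =>
    rw [pyGetD_eq_getD G u k [] hc]
    have hk := pyIdx?_lt _ _ _ hc
    rw [List.getD_eq_getElem _ _ hk]
    exact List.single_le_sum (fun x _ => Nat.zero_le x) _
      (List.mem_map_of_mem (List.getElem_mem hk))

theorem mach_fuel (G : List (List Int)) (M : Nat)
    (hM : ∀ u : Int, (PySem.List.pyGetD G u []).length ≤ M) :
    ∀ (fuel : Nat) (st : List Int × List (Option Int))
      (stack : List (Int × Nat × Option Int)),
      stack.length + cntA st.1 * (M + 1) ≤ fuel →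
      machRun G fuel st stack = machB G st stack := by
  intro fuel
  induction fuel with
  | zero =>
    intro st stack h
    have hs : stack = [] := List.length_eq_zero_iff.mp (by omega)
    subst hs
    rw [machB_nil]
    rfl
  | succ fuel ih =>
    intro st stack h
    match stack with
    | [] => rw [machB_nil]; rfl
    | (u, d, p) :: S =>
      by_cases hg : PySem.List.pyGetD st.1 u 0 = -1
      · rw [machB_pos G st u d p S hg]
        show (if _ = -1 then _ else _) = _
        rw [if_pos hg]
        apply ih
        have h1 : cntA (PySem.List.pySetD st.1 u (d : Int)) + 1 ≤ cntA st.1 :=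
          cnt_set_lt st.1 u (d : Int) hg (by simp)
        have h2 : (cntA (PySem.List.pySetD st.1 u (d : Int)) + 1) * (M + 1) ≤
            cntA st.1 * (M + 1) := Nat.mul_le_mul_right _ h1
        rw [Nat.succ_mul] at h2
        have h3 := hM u
        simp only [List.length_append, List.length_map, List.length_cons] at h ⊢
        omega
      · rw [machB_neg G st u d p S hg]
        show (if _ = -1 then _ else _) = _
        rw [if_neg hg]
        apply ih
        simp only [List.length_cons] at h
        omega

-- ---- the fuelled ports compute the two (equal) DFS states ----

theorem runA_init (L : List (List Int)) (u : Int) :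
    dfsRun L (L.length + 1)
      (List.replicate L.length (-1 : Int), List.replicate L.length none) u 0 =
      (dfsVisitA L
        (List.replicate L.length (-1 : Int), List.replicate L.length none) u 0).val :=
  (dfs_fuel L (L.length + 1)).1 _ u 0 (by simp [cnt_replicate])

theorem runB_init (L : List (List Int)) (u : Int) :
    machRun L (1 + L.length * ((L.map List.length).sum + 1))
      (List.replicate L.length (-1 : Int), List.replicate L.length none)
      [(u, 0, none)] =
      (dfsVisitA L
        (List.replicate L.length (-1 : Int), List.replicate L.length none) u 0).val := by
  rw [mach_fuel L ((L.map List.length).sum) (row_le_sum L) _ _ [(u, 0, none)]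
    (by simp [cnt_replicate])]
  exact dfs_eq L L.length u

-- ===== VERDICT (by name: the statement is the Claim_ definition above) =====
theorem best_root_spec : Claim_equal_best_root := by
  unfold Claim_equal_best_root
  intro L _ _
  unfold Spec_best_root best_root best_root_alt
  simp only [runA_init, runB_init, ← maxIdx_eq]
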